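-- pv_equiv track=rewrite | github.com/itallreturnstonothing/panicpony | common.py | make_batches_of_size
-- ===== SOURCE A (Python) =====
-- import math
--
-- def make_batches_of_size(big_list, batch_size):
--     big_list = list(big_list) if not isinstance(big_list, list) else big_list
--     num_batches = math.ceil(len(big_list) / batch_size)
--     def unnecessary_recursion(remain, build):
--         if not len(remain):
--             # no more ids to distribute
--             return build
--         curr = remain.pop()
--         front = build[1:]
--         end = [build[0] + [curr]]
--         return unnecessary_recursion(remain, front + end)
--
--     kickstart = [big_list[i*(batch_size - 1):(i + 1)*(batch_size - 1)] for i in range(num_batches)]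
--     remain = big_list[num_batches*(batch_size - 1):]
--     return unnecessary_recursion(remain, kickstart)
-- ===== SOURCE B (Python) =====
-- def make_batches_of_size(big_list, batch_size):
--     # One-pass: build the (batch_size-1)-chunks, then send each leftover element
--     # directly to its round-robin bucket and rotate the bucket list once at the end.
--     big_list = list(big_list)
--     n = len(big_list)
--     m = -(-n // batch_size)
--     step = batch_size - 1
--     batches = [big_list[i * step:(i + 1) * step] for i in range(m)]
--     r = max(0, n - m * step)
--     for i in range(r):
--         batches[i % m].append(big_list[n - 1 - i])
--     return batches[r % m:] + batches[:r % m] if m else []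
-- ===== Notes on version B (the rewrite author's own statement) =====
-- stated objective: alternative
-- what changed: Replaces the pop-and-rotate recursion (which rebuilds the whole batch list on every step) by a single round-robin pass that appends each leftover element directly to bucket i % m, with one rotation of the bucket list at the end.
import Mathlib
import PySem

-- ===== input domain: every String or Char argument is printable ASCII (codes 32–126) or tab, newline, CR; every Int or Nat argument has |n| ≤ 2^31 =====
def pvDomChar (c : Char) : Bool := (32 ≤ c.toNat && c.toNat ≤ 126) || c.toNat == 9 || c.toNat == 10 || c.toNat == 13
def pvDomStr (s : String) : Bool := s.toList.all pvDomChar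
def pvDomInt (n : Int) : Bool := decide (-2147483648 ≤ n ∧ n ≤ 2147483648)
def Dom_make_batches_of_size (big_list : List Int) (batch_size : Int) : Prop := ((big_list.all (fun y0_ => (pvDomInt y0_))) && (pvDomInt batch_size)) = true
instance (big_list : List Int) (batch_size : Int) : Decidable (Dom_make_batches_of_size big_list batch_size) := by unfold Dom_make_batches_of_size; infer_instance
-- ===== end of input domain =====

-- B replaces A's pop-and-rotate recursion by one direct round-robin pass plus a single
-- final rotation; equivalence proved on Pre_ (batch_size ≥ 1, plus the degenerate negative
-- sizes on which both programs return []).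

-- ===== PORT A =====
-- A's inner 'unnecessary_recursion': pops the LAST element of remain, appends it to the
-- front batch and rotates the batch list by one.  'build[0]' raises IndexError on an empty
-- build in Python; that is only reachable for batch_size < 1 (outside Pre_), so the
-- total 'pyGetD … 0 []' stands in for it there.
def pvRecA (remain : List Int) (build : List (List Int)) : List (List Int) :=
  if h : remain = [] then build
  else
    let curr := remain.getLast h                                        -- remain.pop()
    let front := PySem.List.slice build (some 1) none                   -- build[1:]
    let endd := [PySem.List.pyGetD build 0 [] ++ [curr]]                -- [build[0] + [curr]]
    pvRecA remain.dropLast (front ++ endd)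
termination_by remain.length
decreasing_by
  have : remain ≠ [] := h
  have := List.length_pos_of_ne_nil this
  simp [List.length_dropLast]; omega

-- math.ceil(len(big_list) / batch_size): ported as exact integer ceiling -((-n) // b),
-- which equals the float computation for the domain's magnitudes (list lengths ≪ 2^53).
def make_batches_of_size (big_list : List Int) (batch_size : Int) : List (List Int) :=
  let n : Int := big_list.length
  let num_batches : Int := -(PySem.Int.floordiv (-n) batch_size)
  let kickstart := (PySem.List.pyRange 0 num_batches 1).map
    (fun i => PySem.List.slice big_list (some (i * (batch_size - 1))) (some ((i + 1) * (batch_size - 1))))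
  let remain := PySem.List.slice big_list (some (num_batches * (batch_size - 1))) none
  pvRecA remain kickstart

-- ===== PORT B =====
-- Source B: chunks, then `for i in range(r): batches[i % m].append(big_list[n-1-i])`, then one
-- rotation `batches[r%m:] + batches[:r%m] if m else []`.  Indexing is total via pyGetD/toNat;
-- for batch_size ≥ 1 every index is in range exactly as in Python.
def make_batches_of_size_alt (big_list : List Int) (batch_size : Int) : List (List Int) :=
  let n : Int := big_list.length
  let m : Int := -(PySem.Int.floordiv (-n) batch_size)
  let step : Int := batch_size - 1
  let batches := (PySem.List.pyRange 0 m 1).map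
    (fun i => PySem.List.slice big_list (some (i * step)) (some ((i + 1) * step)))
  let r : Int := max 0 (n - m * step)
  let batches := (PySem.List.pyRange 0 r 1).foldl
    (fun bs i => bs.modify ((PySem.Int.mod i m).toNat)
      (fun bk => bk ++ [PySem.List.pyGetD big_list (n - 1 - i) 0])) batches
  if m ≠ 0 then
    batches.drop ((PySem.Int.mod r m).toNat) ++ batches.take ((PySem.Int.mod r m).toNat)
  else []

-- ===== PRECONDITION & SPEC =====
-- Pre_ excludes exactly the inputs where A raises: batch_size = 0 (ZeroDivisionError) and
-- the negative batch sizes whose leftover slice is nonempty (IndexError on build[0]);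
-- negative sizes with an empty leftover slice are admitted (both programs return []).
def Pre_make_batches_of_size (big_list : List Int) (batch_size : Int) : Prop :=
  1 ≤ batch_size ∨ (batch_size ≤ -1 ∧
    (big_list.length : Int) ≤
      -(PySem.Int.floordiv (-(big_list.length : Int)) batch_size) * (batch_size - 1))
instance (big_list : List Int) (batch_size : Int) : Decidable (Pre_make_batches_of_size big_list batch_size) := by unfold Pre_make_batches_of_size; infer_instance
def pvWitness_make_batches_of_size : List Int × Int := ([1, 2, 3, 4, 5], 2)

def Spec_make_batches_of_size (big_list : List Int) (batch_size : Int) (out : List (List Int)) : Prop := out = make_batches_of_size_alt big_list batch_size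
instance (big_list : List Int) (batch_size : Int) (out : List (List Int)) : Decidable (Spec_make_batches_of_size big_list batch_size out) := by unfold Spec_make_batches_of_size; infer_instance

-- ===== CLAIM (what is proved, stated in full; the proofs are below) =====
def Claim_equal_make_batches_of_size : Prop := ∀ (big_list : List Int) (batch_size : Int), Dom_make_batches_of_size big_list batch_size → Pre_make_batches_of_size big_list batch_size → Spec_make_batches_of_size big_list batch_size (make_batches_of_size big_list batch_size)

-- ===== LEMMAS AND PROOFS =====

-- A's recursion read front-to-back: consume the reversed remainder head-first.
def pvGoA : List Int → List (List Int) → List (List Int)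
  | [], build => build
  | c :: cs, build => pvGoA cs (build.tail ++ [build.getD 0 [] ++ [c]])

-- Round-robin distribution: element number o (counting from the start) is appended to
-- bucket o % (number of buckets).
def pvDistrib : List Int → Nat → List (List Int) → List (List Int)
  | [], _, b => b
  | c :: cs, o, b => pvDistrib cs (o + 1) (b.modify (o % b.length) (fun bk => bk ++ [c]))

lemma pvDistrib_length (cs : List Int) (o : Nat) (b : List (List Int)) :
    (pvDistrib cs o b).length = b.length := by
  induction cs generalizing o b with
  | nil => rfl
  | cons c cs ih => simp [pvDistrib, ih, List.length_modify]

lemma pvRecA_eq_goA (remain : List Int) (build : List (List Int)) :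
    pvRecA remain build = pvGoA remain.reverse build := by
  induction remain using List.reverseRecOn generalizing build with
  | nil => simp [pvRecA, pvGoA]
  | append_singleton xs x ih =>
    rw [pvRecA]
    have hne : xs ++ [x] ≠ [] := by simp
    rw [dif_neg (by simp : ¬ xs ++ [x] = [])]
    have hlast : (xs ++ [x]).getLast (by simp) = x := List.getLast_concat
    simp only [hlast, List.dropLast_concat, List.reverse_append, List.reverse_cons,
      List.reverse_nil, List.nil_append, List.cons_append, pvGoA, ih,
      PySem.List.slice_from_one, PySem.List.pyGetD_zero]

lemma pv_modify_rotate (l : List (List Int)) (o : Nat) (f : List Int → List Int)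
    (hl : l ≠ []) :
    (l.rotate o).modify 0 f = (l.modify (o % l.length) f).rotate o := by
  have hm : 0 < l.length := List.length_pos_of_ne_nil hl
  apply List.ext_getElem
  · simp [List.length_modify, List.length_rotate]
  · intro j h1 h2
    have hj : j < l.length := by simpa [List.length_modify, List.length_rotate] using h1
    rw [List.getElem_modify, List.getElem_rotate, List.getElem_rotate, List.getElem_modify]
    simp only [List.length_modify]
    by_cases hz : j = 0
    · subst hz
      simp
    · have ho : o % l.length < l.length := Nat.mod_lt _ hm
      have hne2 : o % l.length ≠ (j + o) % l.length := by
        have hmod : (j + o) % l.length = (j + o % l.length) % l.length := by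
          rw [Nat.add_mod, Nat.mod_eq_of_lt hj]
        rcases Nat.lt_or_ge (j + o % l.length) l.length with hlt | hge
        · rw [hmod, Nat.mod_eq_of_lt hlt]; omega
        · have hsub : (j + o % l.length) % l.length = j + o % l.length - l.length := by
            rw [Nat.mod_eq_sub_mod hge]; exact Nat.mod_eq_of_lt (by omega)
          rw [hmod, hsub]; omega
      rw [if_neg (fun hh => hz hh.symm), if_neg hne2]

lemma pvGoA_distrib (cs : List Int) :
    ∀ (o : Nat) (build : List (List Int)), build ≠ [] →
    pvGoA cs (build.rotate o) = (pvDistrib cs o build).rotate (o + cs.length) := by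
  induction cs with
  | nil => intro o build _; simp [pvGoA, pvDistrib]
  | cons c cs ih =>
    intro o build hb
    have hm : 0 < build.length := List.length_pos_of_ne_nil hb
    have hrot_ne : build.rotate o ≠ [] := by
      intro h; apply hb; rwa [← List.length_eq_zero_iff, List.length_rotate,
        List.length_eq_zero_iff] at h
    -- one step of pvGoA is "modify bucket 0, rotate by one"
    have hstep : (build.rotate o).tail ++ [(build.rotate o).getD 0 [] ++ [c]]
        = ((build.rotate o).modify 0 (fun bk => bk ++ [c])).rotate 1 := by
      obtain ⟨a, t, ht⟩ := List.exists_cons_of_ne_nil hrot_ne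
      rw [ht]
      show t ++ [a ++ [c]] = ((a ++ [c]) :: t).rotate 1
      rw [show (1 : Nat) = 0 + 1 from rfl, List.rotate_cons_succ, List.rotate_zero]
    rw [pvGoA, hstep, pv_modify_rotate build o _ hb, List.rotate_rotate,
      ih (o + 1) (build.modify (o % build.length) (fun bk => bk ++ [c]))
        (by intro h; apply hb; rwa [← List.length_eq_zero_iff, List.length_modify,
          List.length_eq_zero_iff] at h)]
    rw [pvDistrib]
    congr 1
    simp [List.length_cons]; omega

-- B's fold over range(a, a+k) equals pvDistrib of the fetched values, starting at offset a.
lemma pv_fold_eq_distrib (g : Int → Int) (mN : Nat) :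
    ∀ (k a : Nat) (bs : List (List Int)), bs.length = mN →
    (PySem.List.pyRange (a : Int) ((a : Int) + (k : Int)) 1).foldl
      (fun bs i => bs.modify ((PySem.Int.mod i (mN : Int)).toNat)
        (fun bk => bk ++ [g i])) bs
    = pvDistrib ((PySem.List.pyRange (a : Int) ((a : Int) + (k : Int)) 1).map g) a bs := by
  intro k
  induction k with
  | zero => intro a bs _; simp [pvDistrib]
  | succ k ih =>
    intro a bs hbs
    rw [PySem.List.pyRange_one_cons (by omega : (a : Int) < (a : Int) + ((k : Nat) + 1 : Nat))]
    simp only [List.foldl_cons, List.map_cons, pvDistrib]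
    have h1 : (PySem.Int.mod (a : Int) (mN : Int)).toNat = a % mN := by
      rw [PySem.Int.mod_natCast]; exact Int.toNat_natCast _
    have h2 : ((a : Int) + 1) = ((a + 1 : Nat) : Int) := by push_cast; ring
    have h3 : ((a : Int) + ((k + 1 : Nat) : Int)) = ((a + 1 : Nat) : Int) + (k : Int) := by
      push_cast; ring
    rw [hbs, h1, h3, h2]
    exact ih (a + 1) _ (by rw [List.length_modify, hbs])

-- the reversed remainder is exactly the list of fetches big_list[n-1-i], i = 0 .. r-1
lemma pv_remain_reverse (big_list : List Int) (D : Int) (hD : 0 ≤ D) :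
    (List.drop D.toNat big_list).reverse
    = (PySem.List.pyRange 0 (max 0 ((big_list.length : Int) - D)) 1).map
        (fun i => PySem.List.pyGetD big_list ((big_list.length : Int) - 1 - i) 0) := by
  set N := big_list.length with hN
  set r : Int := max 0 ((N : Int) - D) with hr
  have hr0 : 0 ≤ r := le_max_left _ _
  apply List.ext_getElem
  · simp [PySem.List.length_pyRange_one, hr]
    omega
  · intro j h1 h2
    have hjr : (j : Int) < r := by
      have := h2; simp [PySem.List.length_pyRange_one] at this; omega
    have hjN : D.toNat + (big_list.length - D.toNat - 1 - j) < N := by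
      simp at h1; omega
    rw [List.getElem_reverse, List.getElem_drop, List.getElem_map,
      PySem.List.getElem_pyRange_one]
    have hidx : (0 : Int) + (j : Int) = (j : Int) := by ring
    rw [hidx, PySem.List.pyGetD_eq_getElem big_list 0 (by omega) (by omega)]
    congr 1
    have hjND : (j : Int) < (N : Int) - D := by
      rcases max_choice 0 ((N : Int) - D) with h | h <;> rw [hr, h] at hjr <;> omega
    have hlen : (List.drop D.toNat big_list).length = N - D.toNat := by simp [hN]
    have hDt : ((D.toNat : Nat) : Int) = D := Int.toNat_of_nonneg hD
    simp at h1
    omega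

-- ===== VERDICT (by name: the statement is the Claim_ definition above) =====
theorem make_batches_of_size_spec : Claim_equal_make_batches_of_size := by
  intro big_list batch_size _ hpre
  unfold Pre_make_batches_of_size at hpre
  unfold Spec_make_batches_of_size
  simp only [make_batches_of_size, make_batches_of_size_alt]
  set N := big_list.length with hN
  set m : Int := -(PySem.Int.floordiv (-(N : Int)) batch_size) with hmdef
  rcases hpre with hb1 | ⟨hbneg, hcond⟩
  case inr =>
    -- batch_size ≤ -1 and the leftover slice is empty: both programs return []
    have hm_le : m ≤ 0 := by
      have h0 : 0 ≤ PySem.Int.floordiv (-(N : Int)) batch_size :=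
        Int.fdiv_nonneg_of_nonpos_of_nonpos (by omega) (by omega)
      omega
    have hD : 0 ≤ m * (batch_size - 1) := by
      have := mul_nonneg (neg_nonneg.mpr hm_le) (by omega : (0:Int) ≤ 1 - batch_size)
      nlinarith
    have hkick : PySem.List.pyRange 0 m 1 = [] := PySem.List.pyRange_one_eq_nil hm_le
    have hrem : PySem.List.slice big_list (some (m * (batch_size - 1))) none = [] := by
      rw [PySem.List.slice_from big_list hD]
      exact List.drop_eq_nil_of_le (by omega)
    have hr : max 0 ((N : Int) - m * (batch_size - 1)) = 0 := max_eq_left (by omega)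
    rw [hrem, hkick, hr]
    simp only [List.map_nil]
    rw [show pvRecA [] [] = [] from by rw [pvRecA]; simp]
    rw [PySem.List.pyRange_one_eq_nil (le_refl (0 : Int))]
    simp
  have hb : (0 : Int) < batch_size := by omega
  have hceil : (m - 1) * batch_size < (N : Int) ∧ (N : Int) ≤ m * batch_size :=
    (PySem.Int.neg_floordiv_neg_eq_iff_of_pos hb).mp rfl
  have hm0 : 0 ≤ m := by
    by_contra h
    rw [Int.not_le] at h
    have := mul_neg_of_neg_of_pos h hb
    omega
  have hstep : 0 ≤ batch_size - 1 := by omega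
  have hD : 0 ≤ m * (batch_size - 1) := mul_nonneg hm0 hstep
  by_cases hN0 : N = 0
  · -- empty input: both sides are []
    have hbl : big_list = [] := by
      rw [← List.length_eq_zero_iff]; exact hN0
    have hmz : m = 0 := by
      by_contra h
      have h1 : 1 ≤ m := by omega
      have : 0 ≤ (m - 1) * batch_size := mul_nonneg (by omega) (le_of_lt hb)
      omega
    simp [hbl, hmz, PySem.List.pyRange_one_eq_nil (le_refl (0 : Int)), pvRecA,
      PySem.List.slice, PySem.List.clampIdx]
  · -- N > 0: m ≥ 1, batch list nonempty
    have hm1 : 1 ≤ m := by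
      by_contra h
      have hmz : m = 0 := by omega
      rw [hmz] at hceil
      simp at hceil
      omega
    set g : Int → Int := fun i => PySem.List.pyGetD big_list ((N : Int) - 1 - i) 0 with hg
    set kick : List (List Int) := (PySem.List.pyRange 0 m 1).map
      (fun i => PySem.List.slice big_list (some (i * (batch_size - 1)))
        (some ((i + 1) * (batch_size - 1)))) with hkick
    set r : Int := max 0 ((N : Int) - m * (batch_size - 1)) with hrdef
    have hr0 : 0 ≤ r := le_max_left _ _
    have hkick_len : kick.length = m.toNat := by
      simp [hkick, PySem.List.length_pyRange_one]
    have hmtpos : 0 < m.toNat := by omega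
    have hkick_ne : kick ≠ [] := by
      intro h
      rw [← List.length_eq_zero_iff, hkick_len] at h
      omega
    have hrcast : ((r.toNat : Nat) : Int) = r := Int.toNat_of_nonneg hr0
    have hmcast : ((m.toNat : Nat) : Int) = m := Int.toNat_of_nonneg hm0
    -- A side: recursion = distribute reversed remainder, then rotate
    have hrem : (PySem.List.slice big_list (some (m * (batch_size - 1))) none).reverse
        = (PySem.List.pyRange 0 r 1).map g := by
      rw [PySem.List.slice_from big_list hD]
      exact pv_remain_reverse big_list (m * (batch_size - 1)) hD
    have hcslen : ((PySem.List.pyRange 0 r 1).map g).length = r.toNat := by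
      simp [PySem.List.length_pyRange_one]
    have hA : pvRecA (PySem.List.slice big_list (some (m * (batch_size - 1))) none) kick
        = (pvDistrib ((PySem.List.pyRange 0 r 1).map g) 0 kick).rotate r.toNat := by
      rw [pvRecA_eq_goA, hrem]
      have := pvGoA_distrib ((PySem.List.pyRange 0 r 1).map g) 0 kick hkick_ne
      rw [List.rotate_zero, Nat.zero_add, hcslen] at this
      exact this
    -- B side: the fold is the same distribution
    have hfold := pv_fold_eq_distrib g m.toNat r.toNat 0 kick hkick_len
    simp only [Nat.cast_zero, zero_add, hrcast, hmcast] at hfold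
    rw [hA, hfold]
    -- the final rotation
    have hmne : ¬ m = 0 := by omega
    simp only [hmne, ne_eq, not_false_eq_true, if_true]
    have hmodr : (PySem.Int.mod r m).toNat = r.toNat % m.toNat := by
      rw [← hrcast, ← hmcast, PySem.Int.mod_natCast]
      exact Int.toNat_natCast _
    set X := pvDistrib ((PySem.List.pyRange 0 r 1).map g) 0 kick with hX
    have hXlen : X.length = m.toNat := by
      rw [hX, pvDistrib_length, hkick_len]
    rw [hmodr, ← List.rotate_mod, hXlen,
      List.rotate_eq_drop_append_take (by rw [hXlen]; exact Nat.le_of_lt (Nat.mod_lt _ hmtpos))]
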